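-- pv_equiv track=rewrite | github.com/all-of-us/raw-data-repository | rdr_service/resource/calculators/participant_ubr.py | ubr_disability
-- ===== SOURCE A (Python) =====
-- from enum import IntEnum
--
-- class UBRValueEnum(IntEnum):
--
--     RBR = 0
--     UBR = 1
--     # NotAnswer_Skip: Answer is Null (only if a TheBasics has been submitted), PMI_PreferNotToAnswer or PMI_Skip value.
--     NotAnswer_Skip = 2
--
-- def ubr_disability(answers):
--     """
--     Diversity Category #9 - Disability
--     Calculate the disability UBR value.
--     :param answers: Dict with keys and answer codes for ped_basics disability questions
--     :return: UBRValueEnum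
--     """
--     # nsch_2 series of questions on whether child uses more medical care mental health/educational services
--     # pedbasics_1 = "Yes" response;  all three must be yes
--     if (answers.get('nsch_2', None) == 'pedbasics_1'
--             and answers.get('nsch_2_condition', None) == 'pedbasics_1'
--             and answers.get('nsch_2_condition_12months', None) == 'pedbasics_1'):
--         return UBRValueEnum.UBR
--
--     # nsch_3 series of questions on whether child is limited/prevented from doing things other children can
--     # All must be "Yes"/pedbasics_1
--     if (answers.get('nsch_3', None) == 'pedbasics_1'
--             and answers.get('nsch_3_condition', None) == 'pedbasics_1'
--             and answers.get('nsch_3_condition_12months', None) == 'pedbasics_1'):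
--         return UBRValueEnum.UBR
--
--     # nsch_4 series of questions on whether child needs/gets specialized therapy
--     # All must be "Yes"/pedbasics_1
--     if (answers.get('nsch_4', None) == 'pedbasics_1'
--             and answers.get('nsch_4_condition', None) == 'pedbasics_1'
--             and answers.get('nsch_4_condition_12months', None) == 'pedbasics_1'):
--         return UBRValueEnum.UBR
--
--     # nsch_5 questions on whether child has developmental/behavioral problems needing treatment
--     # Both must be "Yes"/pedbasics_1
--     if (answers.get('nsch_5', None) == 'pedbasics_1'
--             and answers.get('nsch_5_condition_12months', None) == 'pedbasics_1'):
--         return UBRValueEnum.UBR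
--
--     # aou_1 questions on hearing/vision/speech/cognitive/physical impairments
--     # Both must be "Yes"/pedbasics_1
--     if answers.get('aou_1', None) == 'pedbasics_1' and answers.get('aou_1_12months', None) == 'pedbasics_1':
--         return UBRValueEnum.UBR
--
--     # Check and see if all question answers are either Null, 'Prefer Not To Answer' or PMI_Skip.
--     # TODO:  What does PMI_DontKnow answer map to for aou_1 answer(s)?
--     null_skip = True
--     for k in ['nsch_1', 'nsch_2', 'nsch_3', 'nsch_4', 'nsch_5', 'aou_1']:
--         if answers.get(k, None) not in [None, 'PMI_Skip']:
--             null_skip = False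
--             break
--     if null_skip is True:
--         return UBRValueEnum.NotAnswer_Skip
--     else:
--         return UBRValueEnum.RBR
-- ===== SOURCE B (Python) =====
-- from enum import IntEnum
--
-- class UBRValueEnum(IntEnum):
--     RBR = 0
--     UBR = 1
--     NotAnswer_Skip = 2
--
-- # Key-groups that must be fully answered "Yes" (pedbasics_1) for UBR.
-- _GROUPS = [
--     frozenset(['nsch_2', 'nsch_2_condition', 'nsch_2_condition_12months']),
--     frozenset(['nsch_3', 'nsch_3_condition', 'nsch_3_condition_12months']),
--     frozenset(['nsch_4', 'nsch_4_condition', 'nsch_4_condition_12months']),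
--     frozenset(['nsch_5', 'nsch_5_condition_12months']),
--     frozenset(['aou_1', 'aou_1_12months']),
-- ]
-- _TOP = frozenset(['nsch_1', 'nsch_2', 'nsch_3', 'nsch_4', 'nsch_5', 'aou_1'])
--
-- def ubr_disability(answers):
--     # One scan of the data instead of 13 keyed lookups: build the inverted
--     # index of keys answered "Yes" and note whether any top-level question
--     # got a real (non-skip) answer.
--     yes = set()
--     answered = False
--     for k, v in answers.items():
--         if v == 'pedbasics_1':
--             yes.add(k)
--         if k in _TOP and v != 'PMI_Skip':
--             answered = True
--     for g in _GROUPS: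
--         if g <= yes:
--             return UBRValueEnum.UBR
--     return UBRValueEnum.RBR if answered else UBRValueEnum.NotAnswer_Skip
-- ===== Notes on version B (the rewrite author's own statement) =====
-- stated objective: alternative
-- what changed: Instead of A's thirteen keyed dict lookups (five short-circuit guard chains plus a break-driven scan over six keys), B makes one pass over the answer items building an inverted index (the set of keys answered 'pedbasics_1') and an answered flag, then decides by frozenset-inclusion tests of the constant key-groups; Pre_ excludes association lists with duplicate keys, which do not represent a Python dict argument.
import Mathlib
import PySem

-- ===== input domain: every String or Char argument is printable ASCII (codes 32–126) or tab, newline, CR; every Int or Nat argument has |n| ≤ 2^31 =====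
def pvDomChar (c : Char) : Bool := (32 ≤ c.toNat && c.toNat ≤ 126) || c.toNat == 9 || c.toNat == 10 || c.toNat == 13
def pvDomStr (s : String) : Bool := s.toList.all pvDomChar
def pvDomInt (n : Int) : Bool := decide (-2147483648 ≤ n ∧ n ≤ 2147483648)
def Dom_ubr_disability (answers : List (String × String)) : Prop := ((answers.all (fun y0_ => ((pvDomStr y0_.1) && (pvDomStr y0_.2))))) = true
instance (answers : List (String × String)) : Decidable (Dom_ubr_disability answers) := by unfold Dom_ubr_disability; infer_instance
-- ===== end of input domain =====

-- ===== PORT A =====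
-- B replaces A's 13 keyed lookups (five guard chains + a break loop) by ONE scan of the
-- answer items building a set of yes-keys and an answered flag (objective: simpler).
def ubrGet (answers : List (String × String)) (k : String) : Option String :=
  (PySem.Dict.mk answers).get? k

-- A's null_skip loop with break: stops at the first key whose answer is neither absent nor 'PMI_Skip'.
def ubrNullLoop (answers : List (String × String)) : List String → Bool
  | [] => true
  | k :: ks =>
    if !(ubrGet answers k == none || ubrGet answers k == some "PMI_Skip") then false
    else ubrNullLoop answers ks

def ubr_disability (answers : List (String × String)) : Int :=
  if ubrGet answers "nsch_2" == some "pedbasics_1" && ubrGet answers "nsch_2_condition" == some "pedbasics_1"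
      && ubrGet answers "nsch_2_condition_12months" == some "pedbasics_1" then 1
  else if ubrGet answers "nsch_3" == some "pedbasics_1" && ubrGet answers "nsch_3_condition" == some "pedbasics_1"
      && ubrGet answers "nsch_3_condition_12months" == some "pedbasics_1" then 1
  else if ubrGet answers "nsch_4" == some "pedbasics_1" && ubrGet answers "nsch_4_condition" == some "pedbasics_1"
      && ubrGet answers "nsch_4_condition_12months" == some "pedbasics_1" then 1
  else if ubrGet answers "nsch_5" == some "pedbasics_1" && ubrGet answers "nsch_5_condition_12months" == some "pedbasics_1" then 1
  else if ubrGet answers "aou_1" == some "pedbasics_1" && ubrGet answers "aou_1_12months" == some "pedbasics_1" then 1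
  else if ubrNullLoop answers ["nsch_1", "nsch_2", "nsch_3", "nsch_4", "nsch_5", "aou_1"] then 2
  else 0

-- ===== PORT B =====
-- _GROUPS / _TOP: literal frozensets (distinct elements, as PySem.Set).
def ubrGroups : List (PySem.Set String) :=
  [["nsch_2", "nsch_2_condition", "nsch_2_condition_12months"],
   ["nsch_3", "nsch_3_condition", "nsch_3_condition_12months"],
   ["nsch_4", "nsch_4_condition", "nsch_4_condition_12months"],
   ["nsch_5", "nsch_5_condition_12months"],
   ["aou_1", "aou_1_12months"]]

def ubrTop : PySem.Set String := ["nsch_1", "nsch_2", "nsch_3", "nsch_4", "nsch_5", "aou_1"]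

-- the body of B's single for-loop over answers.items(): state = (yes-set, answered flag)
def ubrScanStep (st : PySem.Set String × Bool) (kv : String × String) : PySem.Set String × Bool :=
  ((if kv.2 == "pedbasics_1" then PySem.Set.add st.1 kv.1 else st.1),
   (st.2 || (PySem.Set.contains ubrTop kv.1 && !(kv.2 == "PMI_Skip"))))

def ubr_disability_alt (answers : List (String × String)) : Int :=
  let st := answers.foldl ubrScanStep (PySem.Set.empty, false)
  if ubrGroups.any (fun g => PySem.Set.issubset g st.1) then 1
  else if st.2 then 0 else 2

-- ===== PRECONDITION & SPEC =====
-- Pre_ excludes association lists with duplicate keys: they do not represent a Python dict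
-- (the function's argument type), and the first-match reading of such a list is a representation artefact.
def Pre_ubr_disability (answers : List (String × String)) : Prop := (answers.map Prod.fst).Nodup
instance (answers : List (String × String)) : Decidable (Pre_ubr_disability answers) := by unfold Pre_ubr_disability; infer_instance

def pvWitness_ubr_disability : (List (String × String)) :=
  [("nsch_2", "pedbasics_1"), ("aou_1", "PMI_Skip")]

def Spec_ubr_disability (answers : List (String × String)) (out : Int) : Prop := out = ubr_disability_alt answers
instance (answers : List (String × String)) (out : Int) : Decidable (Spec_ubr_disability answers out) := by unfold Spec_ubr_disability; infer_instance

-- ===== CLAIM (what is proved, stated in full; the proofs are below) =====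
def Claim_equal_ubr_disability : Prop := ∀ (answers : List (String × String)), Dom_ubr_disability answers → Pre_ubr_disability answers → Spec_ubr_disability answers (ubr_disability answers)

-- ===== LEMMAS AND PROOFS =====

-- B's scan, first component: the yes-set collects exactly the keys answered "pedbasics_1".
theorem ubrScan_fst (l : List (String × String)) (s : PySem.Set String) (b : Bool) (k : String) :
    k ∈ (l.foldl ubrScanStep (s, b)).1 ↔ k ∈ s ∨ ("pedbasics_1" ∈ (l.filter (fun kv => kv.1 == k)).map Prod.snd) := by
  induction l generalizing s b with
  | nil => simp
  | cons kv t ih =>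
    rw [List.foldl_cons]
    by_cases hv : kv.2 = "pedbasics_1" <;> by_cases hk : kv.1 = k <;>
      simp [ubrScanStep, hv, hk, ih, PySem.Set.mem_add] <;> tauto

-- B's scan, second component: the answered flag is an 'any' over the items.
theorem ubrScan_snd (l : List (String × String)) (s : PySem.Set String) (b : Bool) :
    (l.foldl ubrScanStep (s, b)).2 = (b || l.any (fun kv => PySem.Set.contains ubrTop kv.1 && !(kv.2 == "PMI_Skip"))) := by
  induction l generalizing s b with
  | nil => simp
  | cons kv t ih => simp [ubrScanStep, ih, Bool.or_assoc]

-- Under distinct keys, membership in the yes-set is exactly A's lookup test.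
theorem ubrScan_fst_get (l : List (String × String)) (hnd : (l.map Prod.fst).Nodup) (k : String) :
    k ∈ (l.foldl ubrScanStep (PySem.Set.empty, false)).1 ↔ ubrGet l k = some "pedbasics_1" := by
  rw [ubrScan_fst]
  simp only [PySem.Set.empty, List.not_mem_nil, false_or]
  induction l with
  | nil => simp [ubrGet, PySem.Dict.get?]
  | cons kv t ih =>
    simp only [List.map_cons, List.nodup_cons] at hnd
    by_cases hk : kv.1 = k
    · subst hk
      rw [ubrGet, PySem.Dict.get?_mk_cons]
      simp only [List.filter_cons, beq_self_eq_true, if_pos, List.map_cons, List.mem_cons]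
      constructor
      · rintro (h | h)
        · simp [h]
        · exfalso
          rcases List.mem_map.mp h with ⟨p, hp, hpe⟩
          exact hnd.1 (List.mem_map.mpr ⟨p, (List.mem_filter.mp hp).1, (by simpa using (List.mem_filter.mp hp).2)⟩)
      · intro h; left; simpa using h.symm
    · rw [ubrGet, PySem.Dict.get?_mk_cons]
      have : (kv.1 == k) = false := by simpa using hk
      rw [this]
      simp only [Bool.false_eq_true, if_false]
      rw [List.filter_cons]
      rw [this]
      exact ih hnd.2

-- A's break-driven loop over a key list, characterised pointwise.
theorem ubrNullLoop_iff (answers : List (String × String)) (ks : List String) :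
    ubrNullLoop answers ks = true ↔ ∀ k ∈ ks, ubrGet answers k = none ∨ ubrGet answers k = some "PMI_Skip" := by
  induction ks with
  | nil => simp [ubrNullLoop]
  | cons k t ih =>
    rw [ubrNullLoop]
    by_cases h : ubrGet answers k = none ∨ ubrGet answers k = some "PMI_Skip"
    · have hb : (ubrGet answers k == none || ubrGet answers k == some "PMI_Skip") = true := by
        rcases h with h | h <;> simp [h]
      rw [hb]
      simp only [Bool.not_true, Bool.false_eq_true, if_false]
      rw [ih]
      simp only [List.mem_cons]
      constructor
      · intro ha x hx
        rcases hx with rfl | hx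
        · exact h
        · exact ha x hx
      · intro ha x hx; exact ha x (Or.inr hx)
    · have hb : (ubrGet answers k == none || ubrGet answers k == some "PMI_Skip") = false := by
        rcases hg : ubrGet answers k with _ | v
        · exact absurd (Or.inl rfl) (hg ▸ h)
        · have : v ≠ "PMI_Skip" := fun hv => h (Or.inr (hg ▸ hv ▸ rfl))
          simp [this]
      rw [hb]
      simp only [Bool.not_false, if_pos, Bool.false_eq_true, false_iff]
      intro ha
      exact h (ha k List.mem_cons_self)

-- Under distinct keys, B's answered flag is the negation of A's null_skip result.
theorem ubrScan_snd_null (l : List (String × String)) (hnd : (l.map Prod.fst).Nodup) :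
    (l.foldl ubrScanStep (PySem.Set.empty, false)).2 = !(ubrNullLoop l ["nsch_1", "nsch_2", "nsch_3", "nsch_4", "nsch_5", "aou_1"]) := by
  rw [ubrScan_snd]
  simp only [Bool.false_or]
  cases hN : ubrNullLoop l ["nsch_1", "nsch_2", "nsch_3", "nsch_4", "nsch_5", "aou_1"] with
  | true =>
    have hall := (ubrNullLoop_iff l _).mp hN
    simp only [Bool.not_true]
    rw [List.any_eq_false]
    intro kv hkv
    by_cases ht : kv.1 ∈ ubrTop
    · have hnd' : (PySem.Dict.mk l).keys.Nodup := by simpa [PySem.Dict.keys] using hnd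
      have hg : ubrGet l kv.1 = some kv.2 :=
        PySem.Dict.get?_of_mem_items (d := PySem.Dict.mk l) (by simpa using hkv) hnd'
      have hskip : kv.2 = "PMI_Skip" := by
        rcases hall kv.1 (by simpa [ubrTop] using ht) with h | h
        · rw [hg] at h; cases h
        · rw [hg] at h; exact Option.some_inj.mp h
      simp [hskip]
    · intro h
      exact ht ((PySem.Set.contains_iff ubrTop kv.1).mp ((Bool.and_eq_true _ _).mp h).1)
  | false =>
    simp only [Bool.not_false]
    rw [List.any_eq_true]
    by_contra hno
    simp only [not_exists, not_and] at hno
    refine absurd ((ubrNullLoop_iff l ["nsch_1", "nsch_2", "nsch_3", "nsch_4", "nsch_5", "aou_1"]).mpr ?_) (by simp [hN])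
    intro k hk
    by_cases hgk : ubrGet l k = none
    · exact Or.inl hgk
    · right
      rcases Option.ne_none_iff_exists'.mp hgk with ⟨v, hv⟩
      have hmem : (k, v) ∈ l := by
        have := PySem.Dict.mem_items_of_get?_eq_some (d := PySem.Dict.mk l) (k := k) (v := v) hv
        simpa [PySem.Dict.items] using this
      have hct : PySem.Set.contains ubrTop k = true := by
        apply (PySem.Set.contains_iff ubrTop k).mpr
        simpa [ubrTop] using hk
      have := hno (k, v) hmem
      rw [hv]
      simp only [hct, Bool.true_and, Bool.not_eq_true', beq_eq_false_iff_ne, ne_eq, Decidable.not_not] at this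
      simp [this]

-- B's group test equals A's five get?-conjunctions, or-ed.
theorem ubrGroups_any (l : List (String × String)) (hnd : (l.map Prod.fst).Nodup) :
    ubrGroups.any (fun g => PySem.Set.issubset g (l.foldl ubrScanStep (PySem.Set.empty, false)).1)
      = ((ubrGet l "nsch_2" == some "pedbasics_1" && ubrGet l "nsch_2_condition" == some "pedbasics_1" && ubrGet l "nsch_2_condition_12months" == some "pedbasics_1")
        || (ubrGet l "nsch_3" == some "pedbasics_1" && ubrGet l "nsch_3_condition" == some "pedbasics_1" && ubrGet l "nsch_3_condition_12months" == some "pedbasics_1")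
        || (ubrGet l "nsch_4" == some "pedbasics_1" && ubrGet l "nsch_4_condition" == some "pedbasics_1" && ubrGet l "nsch_4_condition_12months" == some "pedbasics_1")
        || (ubrGet l "nsch_5" == some "pedbasics_1" && ubrGet l "nsch_5_condition_12months" == some "pedbasics_1")
        || (ubrGet l "aou_1" == some "pedbasics_1" && ubrGet l "aou_1_12months" == some "pedbasics_1")) := by
  rw [Bool.eq_iff_iff]
  simp only [ubrGroups, List.any_cons, List.any_nil, Bool.or_eq_true, Bool.and_eq_true,
    PySem.Set.issubset_iff, List.forall_mem_cons, beq_iff_eq,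
    and_assoc, ubrScan_fst_get l hnd]
  simp only [List.not_mem_nil, false_implies, forall_const, and_true, Bool.false_eq_true, or_false, or_assoc]

-- ===== VERDICT (by name: the statement is the Claim_ definition above) =====
theorem ubr_disability_spec : Claim_equal_ubr_disability := by
  intro l _ hpre
  unfold Spec_ubr_disability ubr_disability ubr_disability_alt
  simp only []
  rw [ubrGroups_any l hpre, ubrScan_snd_null l hpre]
  cases h2 : (ubrGet l "nsch_2" == some "pedbasics_1" && ubrGet l "nsch_2_condition" == some "pedbasics_1" && ubrGet l "nsch_2_condition_12months" == some "pedbasics_1") <;>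
  cases h3 : (ubrGet l "nsch_3" == some "pedbasics_1" && ubrGet l "nsch_3_condition" == some "pedbasics_1" && ubrGet l "nsch_3_condition_12months" == some "pedbasics_1") <;>
  cases h4 : (ubrGet l "nsch_4" == some "pedbasics_1" && ubrGet l "nsch_4_condition" == some "pedbasics_1" && ubrGet l "nsch_4_condition_12months" == some "pedbasics_1") <;>
  cases h5 : (ubrGet l "nsch_5" == some "pedbasics_1" && ubrGet l "nsch_5_condition_12months" == some "pedbasics_1") <;>
  cases ha : (ubrGet l "aou_1" == some "pedbasics_1" && ubrGet l "aou_1_12months" == some "pedbasics_1") <;>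
  cases hn : ubrNullLoop l ["nsch_1", "nsch_2", "nsch_3", "nsch_4", "nsch_5", "aou_1"] <;>
    simp
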